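-- pv_equiv track=rewrite | github.com/till-s/eth-rmii-mac | scripts/mcHash.py | mcHash
-- ===== SOURCE A (Python) =====
-- def mcHash(mcAddr, le_poly=0x33):
--   h = 0
--   for i in range(48):
--     s = (mcAddr & 1)
--     mcAddr >>= 1
--     if s != 0:
--        mcAddr ^= le_poly
--   return mcAddr
-- ===== SOURCE B (Python) =====
-- def mcHash(mcAddr, le_poly=0x33):
--     # Byte-wise table-driven LFSR: 256-entry table of 8-step contributions, then 6 byte steps.
--     table = []
--     for b in range(256):
--         v = b
--         for _ in range(8):
--             s = v & 1
--             v >>= 1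
--             if s:
--                 v ^= le_poly
--         table.append(v)
--     r = mcAddr
--     for _ in range(6):
--         b = r & 0xFF
--         r >>= 8
--         r ^= table[b]
--     return r
-- ===== Notes on version B (the rewrite author's own statement) =====
-- stated objective: alternative
-- what changed: Replaces the 48 single-bit LFSR iterations by a byte-wise pass: a 256-entry lookup table of 8-step XOR contributions is built from le_poly, then the address is consumed in 6 byte steps (shift by 8, XOR the table entry for the low byte), exploiting the GF(2)-linearity of the bit step.
import Mathlib
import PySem

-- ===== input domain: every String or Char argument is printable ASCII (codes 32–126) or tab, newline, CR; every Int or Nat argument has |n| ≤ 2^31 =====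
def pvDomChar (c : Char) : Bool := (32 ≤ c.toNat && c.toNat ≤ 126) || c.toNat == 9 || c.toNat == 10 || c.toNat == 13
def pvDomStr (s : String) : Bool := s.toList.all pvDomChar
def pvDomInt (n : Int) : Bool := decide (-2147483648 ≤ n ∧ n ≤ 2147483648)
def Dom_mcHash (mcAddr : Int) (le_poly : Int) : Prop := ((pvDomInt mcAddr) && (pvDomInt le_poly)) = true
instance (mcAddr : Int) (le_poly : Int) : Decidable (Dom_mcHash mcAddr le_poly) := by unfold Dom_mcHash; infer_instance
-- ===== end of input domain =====

-- B replaces the 48 single-bit LFSR steps by a 256-entry table of 8-step contributions and 6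
-- byte-wise steps (alternative decomposition; return value only — A's local variable h is dead).

-- ===== PORT A =====
-- literal port of A's loop: 48 iterations of (extract low bit, shift right, conditionally xor poly);
-- A's local 'h = 0' is never used and is dropped.
def mcHash (mcAddr : Int) (le_poly : Int) : Int :=
  (PySem.List.pyRange 0 48 1).foldl
    (fun a _i =>
      let s := PySem.Int.band a 1
      let a' := a >>> (1 : Nat)
      if s ≠ 0 then PySem.Int.bxor a' le_poly else a') mcAddr

-- ===== PORT B =====
-- literal port of Source B: build table[b] = 8-bit-step result on b, then 6 byte steps.
def mcHash_alt (mcAddr : Int) (le_poly : Int) : Int :=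
  let table := (PySem.List.pyRange 0 256 1).map (fun b =>
    (PySem.List.pyRange 0 8 1).foldl
      (fun v _i =>
        let s := PySem.Int.band v 1
        let v' := v >>> (1 : Nat)
        if s ≠ 0 then PySem.Int.bxor v' le_poly else v') b)
  (PySem.List.pyRange 0 6 1).foldl
    (fun r _i =>
      let b := PySem.Int.band r 255
      let r' := r >>> (8 : Nat)
      PySem.Int.bxor r' (PySem.List.pyGetD table b 0)) mcAddr

-- ===== PRECONDITION & SPEC =====
def Spec_mcHash (mcAddr : Int) (le_poly : Int) (out : Int) : Prop := out = mcHash_alt mcAddr le_poly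
instance (mcAddr : Int) (le_poly : Int) (out : Int) : Decidable (Spec_mcHash mcAddr le_poly out) := by unfold Spec_mcHash; infer_instance

-- ===== CLAIM (what is proved, stated in full; the proofs are below) =====
def Claim_equal_mcHash : Prop := ∀ (mcAddr : Int) (le_poly : Int), Dom_mcHash mcAddr le_poly → Spec_mcHash mcAddr le_poly (mcHash mcAddr le_poly)

-- ===== LEMMAS AND PROOFS =====

-- the single-bit LFSR step (the shared loop body of A's loop and B's table builder)
def pvStep (P : Int) (v : Int) : Int :=
  if PySem.Int.band v 1 ≠ 0 then PySem.Int.bxor (v >>> (1 : Nat)) P else v >>> (1 : Nat)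

-- B's byte step (with the table lookup inlined)
def pvByteStep (P : Int) (r : Int) : Int :=
  PySem.Int.bxor (r >>> (8 : Nat))
    (PySem.List.pyGetD
      ((PySem.List.pyRange 0 256 1).map (fun x => (PySem.List.pyRange 0 8 1).foldl (fun v _i => pvStep P v) x))
      (PySem.Int.band r 255) 0)

-- extensionality of Int by two's-complement bits
theorem pvInt_ext {a b : Int} (h : ∀ i, a.testBit i = b.testBit i) : a = b := by
  cases a with
  | ofNat m =>
    cases b with
    | ofNat n =>
      exact congrArg Int.ofNat (Nat.eq_of_testBit_eq (fun i => by simpa [Int.testBit] using h i))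
    | negSucc n =>
      exfalso
      have h1 : m.testBit (m + n) = false :=
        Nat.testBit_lt_two_pow (lt_of_le_of_lt (Nat.le_add_right m n) Nat.lt_two_pow_self)
      have h2 : n.testBit (m + n) = false :=
        Nat.testBit_lt_two_pow (lt_of_le_of_lt (Nat.le_add_left n m) Nat.lt_two_pow_self)
      have := h (m + n)
      simp [Int.testBit, h1, h2] at this
  | negSucc m =>
    cases b with
    | ofNat n =>
      exfalso
      have h1 : m.testBit (m + n) = false :=
        Nat.testBit_lt_two_pow (lt_of_le_of_lt (Nat.le_add_right m n) Nat.lt_two_pow_self)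
      have h2 : n.testBit (m + n) = false :=
        Nat.testBit_lt_two_pow (lt_of_le_of_lt (Nat.le_add_left n m) Nat.lt_two_pow_self)
      have := h (m + n)
      simp [Int.testBit, h1, h2] at this
    | negSucc n =>
      have : m = n := Nat.eq_of_testBit_eq (fun i => by
        have := h i; simpa [Int.testBit] using this)
      exact congrArg Int.negSucc this

theorem pv_tb_shiftRight (a : Int) (s i : Nat) : (a >>> s).testBit i = a.testBit (s + i) := by
  cases a with
  | ofNat n =>
    have h : (Int.ofNat n) >>> s = Int.ofNat (n >>> s) := rfl
    rw [h]
    simp [Int.testBit, Nat.testBit_shiftRight]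
  | negSucc n =>
    have h : (Int.negSucc n) >>> s = Int.negSucc (n >>> s) := rfl
    rw [h]
    simp [Int.testBit, Nat.testBit_shiftRight]

-- PySem's Python-exact bxor/band coincide with Mathlib's Int.xor/Int.land
theorem pv_bxor_eq (a b : Int) : PySem.Int.bxor a b = Int.xor a b := by
  cases a with
  | ofNat m =>
    cases b with
    | ofNat n => simp [PySem.Int.bxor, Int.xor]
    | negSucc n =>
      have hb : ¬ (0 : Int) ≤ Int.negSucc n := by simp [Int.negSucc_eq]; omega
      have ht : (-(Int.negSucc n) - 1).toNat = n := by simp [Int.negSucc_eq]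
      simp [PySem.Int.bxor, Int.xor, Int.negSucc_eq]; omega
  | negSucc m =>
    have ha : ¬ (0 : Int) ≤ Int.negSucc m := by simp [Int.negSucc_eq]; omega
    have hta : (-(Int.negSucc m) - 1).toNat = m := by simp [Int.negSucc_eq]
    cases b with
    | ofNat n =>
      simp [PySem.Int.bxor, Int.xor, Int.negSucc_eq]; omega
    | negSucc n =>
      have hb : ¬ (0 : Int) ≤ Int.negSucc n := by simp [Int.negSucc_eq]; omega
      have htb : (-(Int.negSucc n) - 1).toNat = n := by simp [Int.negSucc_eq]
      simp [PySem.Int.bxor, Int.xor, ha, hb]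

theorem pv_ldiff_add (m n : Nat) : (m &&& n) + m.ldiff n = m := by
  induction m using Nat.binaryRec generalizing n with
  | zero => simp [Nat.ldiff]
  | bit b m ih =>
    cases n using Nat.bitCasesOn with
    | _ c n =>
      rw [Nat.land_bit, Nat.ldiff_bit]
      have := ih n
      cases b <;> cases c <;> simp [Nat.bit_val] at * <;> omega

theorem pv_band_eq (a b : Int) : PySem.Int.band a b = Int.land a b := by
  cases a with
  | ofNat m =>
    cases b with
    | ofNat n => simp [PySem.Int.band, Int.land]
    | negSucc n =>
      have hb : ¬ (0 : Int) ≤ Int.negSucc n := by simp [Int.negSucc_eq]; omega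
      have ht : (-(Int.negSucc n) - 1).toNat = n := by simp [Int.negSucc_eq]
      have := pv_ldiff_add m n
      simp [PySem.Int.band, Int.land, hb]; omega
  | negSucc m =>
    have ha : ¬ (0 : Int) ≤ Int.negSucc m := by simp [Int.negSucc_eq]; omega
    have hta : (-(Int.negSucc m) - 1).toNat = m := by simp [Int.negSucc_eq]
    cases b with
    | ofNat n =>
      have := pv_ldiff_add n m
      simp [PySem.Int.band, Int.land, ha]; omega
    | negSucc n =>
      have hb : ¬ (0 : Int) ≤ Int.negSucc n := by simp [Int.negSucc_eq]; omega
      have htb : (-(Int.negSucc n) - 1).toNat = n := by simp [Int.negSucc_eq]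
      simp [PySem.Int.band, Int.land, Int.negSucc_eq]; omega

theorem pv_tb_bxor (a b : Int) (i : Nat) :
    (PySem.Int.bxor a b).testBit i = (a.testBit i ^^ b.testBit i) := by
  rw [pv_bxor_eq]; exact Int.testBit_lxor a b i

theorem pv_tb_band (a b : Int) (i : Nat) :
    (PySem.Int.band a b).testBit i = (a.testBit i && b.testBit i) := by
  rw [pv_band_eq]; exact Int.testBit_land a b i

theorem pv_tb_255 (k : Nat) : (255 : Int).testBit k = decide (k < 8) := by
  show Nat.testBit 255 k = decide (k < 8)
  have : (255 : Nat) = 2 ^ 8 - 1 := by norm_num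
  rw [this, Nat.testBit_two_pow_sub_one]

theorem pv_tb_zero (i : Nat) : (0 : Int).testBit i = false := by
  show Nat.testBit 0 i = false
  exact Nat.zero_testBit i

theorem pv_tb_one (i : Nat) : (1 : Int).testBit i = decide (0 = i) := by
  show Nat.testBit 1 i = decide (0 = i)
  have h : (1 : Nat) = 2 ^ 0 := by norm_num
  rw [h, Nat.testBit_two_pow]

theorem pv_band_one_eq (v : Int) :
    PySem.Int.band v 1 = if v.testBit 0 then 1 else 0 := by
  apply pvInt_ext
  intro i
  rw [pv_tb_band, pv_tb_one]
  cases h : v.testBit 0 with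
  | false =>
    rw [if_neg (by simp)]
    rw [pv_tb_zero]
    by_cases hi : 0 = i
    · subst hi; simp [h]
    · simp [hi]
  | true =>
    rw [if_pos rfl, pv_tb_one]
    by_cases hi : 0 = i
    · subst hi; simp [h]
    · simp [hi]

theorem pv_step_eq (P v : Int) :
    pvStep P v = if v.testBit 0 then PySem.Int.bxor (v >>> (1 : Nat)) P else v >>> (1 : Nat) := by
  unfold pvStep
  rw [pv_band_one_eq]
  cases h : v.testBit 0 <;> simp

theorem pv_tb_step (P v : Int) (k : Nat) :
    (pvStep P v).testBit k = ((v.testBit (1 + k)) ^^ (v.testBit 0 && P.testBit k)) := by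
  rw [pv_step_eq]
  cases h : v.testBit 0 <;> simp [pv_tb_bxor, pv_tb_shiftRight]

theorem pv_step_xor (P a b : Int) :
    pvStep P (PySem.Int.bxor a b) = PySem.Int.bxor (pvStep P a) (pvStep P b) := by
  apply pvInt_ext
  intro k
  simp only [pv_tb_step, pv_tb_bxor]
  cases a.testBit 0 <;> cases b.testBit 0 <;> cases a.testBit (1 + k) <;> cases b.testBit (1 + k) <;>
    cases P.testBit k <;> rfl

theorem pv_iter_step_xor (P : Int) (k : Nat) (a b : Int) :
    (pvStep P)^[k] (PySem.Int.bxor a b) = PySem.Int.bxor ((pvStep P)^[k] a) ((pvStep P)^[k] b) := by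
  induction k generalizing a b with
  | zero => rfl
  | succ k ih => simp [Function.iterate_succ_apply, pv_step_xor, ih]

theorem pv_bxor_cancel (r L : Int) : PySem.Int.bxor (PySem.Int.bxor r L) L = r := by
  apply pvInt_ext
  intro i
  simp [pv_tb_bxor]

theorem pv_steps_even (P : Int) : ∀ (k : Nat) (H : Int),
    (∀ j, j < k → H.testBit j = false) → (pvStep P)^[k] H = H >>> k := by
  intro k
  induction k with
  | zero =>
    intro H _
    simp
  | succ k ih =>
    intro H h
    rw [Function.iterate_succ_apply]
    have hstep : pvStep P H = H >>> (1 : Nat) := by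
      rw [pv_step_eq, h 0 (Nat.succ_pos k)]
      simp
    rw [hstep, ih (H >>> (1 : Nat)) (fun j hj => by
      rw [pv_tb_shiftRight]
      exact h (1 + j) (by omega))]
    apply pvInt_ext
    intro i
    rw [pv_tb_shiftRight, pv_tb_shiftRight, pv_tb_shiftRight]
    congr 1
    omega

theorem pv_band255_bounds (r : Int) :
    0 ≤ PySem.Int.band r 255 ∧ PySem.Int.band r 255 < 256 := by
  cases r with
  | ofNat n =>
    have h : n &&& 255 ≤ 255 := Nat.and_le_right
    simp [PySem.Int.band]
    omega
  | negSucc m =>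
    have ha : ¬ (0 : Int) ≤ Int.negSucc m := by simp [Int.negSucc_eq]; omega
    have hta : (-(Int.negSucc m) - 1).toNat = m := by simp [Int.negSucc_eq]
    have h : (255 : Nat) &&& m ≤ 255 := Nat.and_le_left
    simp [PySem.Int.band, ha]
    omega

theorem pv_tb_H_low (r : Int) (j : Nat) (hj : j < 8) :
    (PySem.Int.bxor r (PySem.Int.band r 255)).testBit j = false := by
  simp [pv_tb_bxor, pv_tb_band, pv_tb_255, hj]

theorem pv_tb_H_high (r : Int) (i : Nat) (hi : 8 ≤ i) :
    (PySem.Int.bxor r (PySem.Int.band r 255)).testBit i = r.testBit i := by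
  simp [pv_tb_bxor, pv_tb_band, pv_tb_255, Nat.not_lt.mpr hi]

-- 8 single-bit steps = (shift the high part) xor (8 steps on the low byte)
theorem pv_step8_decomp (P r : Int) :
    (pvStep P)^[8] r =
      PySem.Int.bxor (r >>> (8 : Nat)) ((pvStep P)^[8] (PySem.Int.band r 255)) := by
  have hr : r = PySem.Int.bxor (PySem.Int.bxor r (PySem.Int.band r 255)) (PySem.Int.band r 255) :=
    (pv_bxor_cancel r _).symm
  calc (pvStep P)^[8] r
      = (pvStep P)^[8] (PySem.Int.bxor (PySem.Int.bxor r (PySem.Int.band r 255)) (PySem.Int.band r 255)) := by rw [← hr]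
    _ = PySem.Int.bxor ((pvStep P)^[8] (PySem.Int.bxor r (PySem.Int.band r 255)))
          ((pvStep P)^[8] (PySem.Int.band r 255)) := pv_iter_step_xor P 8 _ _
    _ = PySem.Int.bxor (r >>> (8 : Nat)) ((pvStep P)^[8] (PySem.Int.band r 255)) := by
        congr 1
        rw [pv_steps_even P 8 _ (fun j hj => pv_tb_H_low r j hj)]
        apply pvInt_ext
        intro i
        rw [pv_tb_shiftRight, pv_tb_shiftRight]
        exact pv_tb_H_high r (8 + i) (by omega)

theorem pv_foldl_const {α : Type} (f : α → α) : ∀ (l : List Int) (x : α),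
    l.foldl (fun a _ => f a) x = f^[l.length] x := by
  intro l
  induction l with
  | nil => intro x; rfl
  | cons y t ih =>
    intro x
    simp [List.foldl, ih, Function.iterate_succ_apply]

theorem pv_byteStep_eq (P r : Int) : pvByteStep P r = (pvStep P)^[8] r := by
  unfold pvByteStep
  have hb := pv_band255_bounds r
  rw [PySem.List.pyGetD_map_pyRange_of_nonneg _ 256 _ _ hb.1 hb.2]
  rw [pv_foldl_const (pvStep P)]
  rw [show (PySem.List.pyRange 0 8 1).length = 8 from by decide]
  exact (pv_step8_decomp P r).symm

theorem pv_mcHash_eq (m p : Int) : mcHash m p = (pvStep p)^[48] m := by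
  show (PySem.List.pyRange 0 48 1).foldl (fun a _ => pvStep p a) m = _
  rw [pv_foldl_const (pvStep p)]
  rw [show (PySem.List.pyRange 0 48 1).length = 48 from by decide]

theorem pv_mcHash_alt_eq (m p : Int) : mcHash_alt m p = (pvByteStep p)^[6] m := by
  show (PySem.List.pyRange 0 6 1).foldl (fun r _ => pvByteStep p r) m = _
  rw [pv_foldl_const (pvByteStep p)]
  rw [show (PySem.List.pyRange 0 6 1).length = 6 from by decide]

-- ===== VERDICT (by name: the statement is the Claim_ definition above) =====
theorem mcHash_spec : Claim_equal_mcHash := by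
  intro m p _
  show mcHash m p = mcHash_alt m p
  rw [pv_mcHash_eq, pv_mcHash_alt_eq]
  have hfun : pvByteStep p = (pvStep p)^[8] := funext (pv_byteStep_eq p)
  rw [hfun, ← Function.iterate_mul]
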